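-- pv_equiv track=rewrite | github.com/msuhasiya42/mentor-mind | backend/services/search_engines.py | _determine_resource_type
-- ===== SOURCE A (Python) =====
-- def _determine_resource_type(line: str) -> tuple:
--     """Determine resource type and platform from line content"""
--     line_lower = line.lower()
--
--     if any(keyword in line_lower for keyword in ['youtube', 'video', 'channel']):
--         return 'video', 'YouTube'
--     elif any(keyword in line_lower for keyword in ['course', 'udemy', 'coursera', 'edx']):
--         return 'course', 'Online Course Platform'
--     elif any(keyword in line_lower for keyword in ['documentation', 'docs', 'official']):
--         return 'documentation', 'Official Documentation'
--     elif any(keyword in line_lower for keyword in ['blog', 'article', 'medium']):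
--         return 'blog', 'Technical Blog'
--     elif any(keyword in line_lower for keyword in ['github', 'repository', 'repo']):
--         return 'repository', 'GitHub'
--     elif any(keyword in line_lower for keyword in ['book', 'ebook']):
--         return 'book', 'Book'
--     else:
--         return 'tutorial', 'Web Resource'
-- ===== SOURCE B (Python) =====
-- _KW = {
--     'youtube': 0, 'video': 0, 'channel': 0,
--     'course': 1, 'udemy': 1, 'coursera': 1, 'edx': 1,
--     'documentation': 2, 'docs': 2, 'official': 2,
--     'blog': 3, 'article': 3, 'medium': 3,
--     'github': 4, 'repository': 4, 'repo': 4,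
--     'book': 5, 'ebook': 5,
-- }
-- _KW_LENS = (3, 4, 5, 6, 7, 8, 10, 13)
-- _RESULTS = (
--     ('video', 'YouTube'),
--     ('course', 'Online Course Platform'),
--     ('documentation', 'Official Documentation'),
--     ('blog', 'Technical Blog'),
--     ('repository', 'GitHub'),
--     ('book', 'Book'),
--     ('tutorial', 'Web Resource'),
-- )
--
-- def _determine_resource_type(line: str) -> tuple:
--     """Dictionary substring scan: slide over the lowered line once and look each
--     candidate slice up in a keyword->priority table, keeping the best priority."""
--     s = line.lower()
--     best = 6
--     for i in range(len(s)):
--         for L in _KW_LENS: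
--             idx = _KW.get(s[i:i+L])
--             if idx is not None and idx < best:
--                 best = idx
--     return _RESULTS[best]
-- ===== Notes on version B (the rewrite author's own statement) =====
-- stated objective: alternative
-- what changed: Replaces the per-keyword substring tests of the if/elif chain by a single left-to-right scan of the lowered line that looks each candidate slice up in a keyword->priority hash table and keeps the minimum priority.
import Mathlib
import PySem

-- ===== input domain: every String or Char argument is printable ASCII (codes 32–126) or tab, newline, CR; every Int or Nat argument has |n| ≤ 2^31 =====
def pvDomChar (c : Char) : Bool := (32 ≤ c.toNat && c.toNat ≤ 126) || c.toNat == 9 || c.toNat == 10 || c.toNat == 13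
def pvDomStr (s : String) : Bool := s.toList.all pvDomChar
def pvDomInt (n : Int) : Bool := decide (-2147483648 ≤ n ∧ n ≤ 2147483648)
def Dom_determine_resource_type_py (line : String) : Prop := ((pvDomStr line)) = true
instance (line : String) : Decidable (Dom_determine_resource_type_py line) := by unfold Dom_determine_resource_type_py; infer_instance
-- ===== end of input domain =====

-- B replaces the if/elif keyword-group chain by a single positional scan of the lowered
-- line whose candidate slices are looked up in a keyword->priority table (alternative algorithm, same results).
-- ===== PORT A =====
def determine_resource_type_py (line : String) : String × String :=
  let line_lower := PySem.Str.lower line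
  if ["youtube", "video", "channel"].any (fun k => PySem.Str.isIn k line_lower) then
    ("video", "YouTube")
  else if ["course", "udemy", "coursera", "edx"].any (fun k => PySem.Str.isIn k line_lower) then
    ("course", "Online Course Platform")
  else if ["documentation", "docs", "official"].any (fun k => PySem.Str.isIn k line_lower) then
    ("documentation", "Official Documentation")
  else if ["blog", "article", "medium"].any (fun k => PySem.Str.isIn k line_lower) then
    ("blog", "Technical Blog")
  else if ["github", "repository", "repo"].any (fun k => PySem.Str.isIn k line_lower) then
    ("repository", "GitHub")
  else if ["book", "ebook"].any (fun k => PySem.Str.isIn k line_lower) then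
    ("book", "Book")
  else
    ("tutorial", "Web Resource")

-- ===== PORT B =====
def pvKW : PySem.Dict String Int := PySem.Dict.ofList
  [("youtube", 0), ("video", 0), ("channel", 0),
   ("course", 1), ("udemy", 1), ("coursera", 1), ("edx", 1),
   ("documentation", 2), ("docs", 2), ("official", 2),
   ("blog", 3), ("article", 3), ("medium", 3),
   ("github", 4), ("repository", 4), ("repo", 4),
   ("book", 5), ("ebook", 5)]

def pvKW_LENS : List Int := [3, 4, 5, 6, 7, 8, 10, 13]

def pvRESULTS : List (String × String) :=
  [("video", "YouTube"),
   ("course", "Online Course Platform"),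
   ("documentation", "Official Documentation"),
   ("blog", "Technical Blog"),
   ("repository", "GitHub"),
   ("book", "Book"),
   ("tutorial", "Web Resource")]

def determine_resource_type_py_alt (line : String) : String × String :=
  let s := PySem.Str.lower line
  let best := (PySem.List.pyRange 0 (PySem.Str.len s) 1).foldl
    (fun best i => pvKW_LENS.foldl
      (fun best L =>
        match pvKW.get? (PySem.Str.slice s (some i) (some (i + L))) with
        | some idx => if idx < best then idx else best
        | none => best) best) 6
  -- _RESULTS[best]: 0 ≤ best ≤ 6 always holds, so Python never raises; the getD default is unreachable
  (PySem.List.pyGet? pvRESULTS best).getD ("tutorial", "Web Resource")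

-- ===== PRECONDITION & SPEC =====
def Spec_determine_resource_type_py (line : String) (out : String × String) : Prop := out = determine_resource_type_py_alt line
instance (line : String) (out : String × String) : Decidable (Spec_determine_resource_type_py line out) := by unfold Spec_determine_resource_type_py; infer_instance

-- ===== CLAIM (what is proved, stated in full; the proofs are below) =====
def Claim_equal_determine_resource_type_py : Prop := ∀ (line : String), Dom_determine_resource_type_py line → Spec_determine_resource_type_py line (determine_resource_type_py line)

-- ===== LEMMAS AND PROOFS =====

-- The scan's accumulator value, named for the proofs (definitionally B's `best`).
def pvBest (s : String) : Int :=
  (PySem.List.pyRange 0 (PySem.Str.len s) 1).foldl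
    (fun best i => pvKW_LENS.foldl
      (fun best L =>
        match pvKW.get? (PySem.Str.slice s (some i) (some (i + L))) with
        | some idx => if idx < best then idx else best
        | none => best) best) 6

theorem alt_eq_pvBest (line : String) :
    determine_resource_type_py_alt line =
      (PySem.List.pyGet? pvRESULTS (pvBest (PySem.Str.lower line))).getD ("tutorial", "Web Resource") := rfl

-- Flatten the nested loop into one fold over (position, length) pairs.
theorem foldl_nested {α β : Type} (xs : List α) (ys : List β) (f : Int → α → β → Int) :
    ∀ b : Int, xs.foldl (fun b i => ys.foldl (fun b L => f b i L) b) b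
      = (xs.flatMap (fun i => ys.map (fun L => (i, L)))).foldl (fun b p => f b p.1 p.2) b := by
  induction xs with
  | nil => intro b; rfl
  | cons x xs ih =>
    intro b
    simp only [List.foldl_cons, List.flatMap_cons, List.foldl_append, List.foldl_map, ih]

-- Generic facts about the min-keeping scan step.
theorem scanFold_le {α : Type} (look : α → Option Int) :
    ∀ (l : List α) (b : Int),
      l.foldl (fun b x => match look x with
        | some idx => if idx < b then idx else b
        | none => b) b ≤ b := by
  intro l
  induction l with
  | nil => intro b; simp
  | cons x l ih =>
    intro b
    simp only [List.foldl_cons]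
    rcases h : look x with _ | idx
    · simpa [h] using ih b
    · dsimp only
      split_ifs with hlt
      · exact le_trans (ih idx) (le_of_lt hlt)
      · exact ih b

theorem scanFold_le_of_hit {α : Type} (look : α → Option Int) :
    ∀ (l : List α) (b : Int) (x : α) (idx : Int), x ∈ l → look x = some idx →
      l.foldl (fun b x => match look x with
        | some idx => if idx < b then idx else b
        | none => b) b ≤ idx := by
  intro l
  induction l with
  | nil => intro b x idx hx; simp at hx
  | cons y l ih =>
    intro b x idx hx hlook
    simp only [List.foldl_cons]
    rcases List.mem_cons.mp hx with rfl | hx'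
    · rw [hlook]; dsimp only
      split_ifs with hlt
      · exact scanFold_le look l idx
      · exact le_trans (scanFold_le look l b) (le_of_not_gt hlt)
    · exact ih _ x idx hx' hlook

theorem scanFold_cases {α : Type} (look : α → Option Int) :
    ∀ (l : List α) (b : Int),
      l.foldl (fun b x => match look x with
        | some idx => if idx < b then idx else b
        | none => b) b = b ∨
      ∃ x ∈ l, look x = some (l.foldl (fun b x => match look x with
        | some idx => if idx < b then idx else b
        | none => b) b) := by
  intro l
  induction l with
  | nil => intro b; left; rfl
  | cons y l ih =>
    intro b
    simp only [List.foldl_cons]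
    rcases h : look y with _ | idx
    · dsimp only
      rcases ih b with hb | ⟨x, hx, hl⟩
      · left; exact hb
      · right; exact ⟨x, List.mem_cons_of_mem _ hx, hl⟩
    · dsimp only
      split_ifs with hlt
      · rcases ih idx with hb | ⟨x, hx, hl⟩
        · right; exact ⟨y, List.mem_cons_self .., by rw [h, hb]⟩
        · right; exact ⟨x, List.mem_cons_of_mem _ hx, hl⟩
      · rcases ih b with hb | ⟨x, hx, hl⟩
        · left; exact hb
        · right; exact ⟨x, List.mem_cons_of_mem _ hx, hl⟩

-- pvBest as a single scan over pairs.
def pvLook (s : String) (p : Int × Int) : Option Int :=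
  pvKW.get? (PySem.Str.slice s (some p.1) (some (p.1 + p.2)))

def pvPairs (s : String) : List (Int × Int) :=
  (PySem.List.pyRange 0 (PySem.Str.len s) 1).flatMap (fun i => pvKW_LENS.map (fun L => (i, L)))

theorem pvBest_eq_scan (s : String) :
    pvBest s = (pvPairs s).foldl (fun b p => match pvLook s p with
      | some idx => if idx < b then idx else b
      | none => b) 6 := by
  unfold pvBest pvPairs pvLook
  exact foldl_nested _ _ _ 6

theorem mem_pvPairs (s : String) (p : Int × Int) :
    p ∈ pvPairs s ↔ (0 ≤ p.1 ∧ p.1 < PySem.Str.len s) ∧ p.2 ∈ pvKW_LENS := by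
  unfold pvPairs
  constructor
  · intro h
    rcases List.mem_flatMap.mp h with ⟨i, hi, hp⟩
    rcases List.mem_map.mp hp with ⟨L, hL, rfl⟩
    exact ⟨by simpa using (PySem.List.mem_pyRange_one).mp hi, hL⟩
  · intro ⟨⟨h0, h1⟩, hL⟩
    exact List.mem_flatMap.mpr ⟨p.1, (PySem.List.mem_pyRange_one).mpr ⟨h0, h1⟩,
      List.mem_map.mpr ⟨p.2, hL, rfl⟩⟩

-- A dictionary hit at a scanned pair means: the slice is a keyword of that priority,
-- and that keyword is a substring of s.
theorem isIn_of_hit (s : String) (p : Int × Int) (idx : Int)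
    (hp : p ∈ pvPairs s) (h : pvLook s p = some idx) :
    ∃ kw : String, (kw, idx) ∈ pvKW.items ∧ PySem.Str.isIn kw s = true := by
  rcases (mem_pvPairs s p).mp hp with ⟨⟨h0, _⟩, hL⟩
  unfold pvLook at h
  refine ⟨PySem.Str.slice s (some p.1) (some (p.1 + p.2)),
    PySem.Dict.mem_items_of_get?_eq_some pvKW h, ?_⟩
  rw [PySem.Str.isIn_iff_infix]
  have hL2 : (0:Int) < p.2 := by
    simp only [pvKW_LENS, List.mem_cons, List.not_mem_nil, or_false] at hL
    omega
  have hsl : (PySem.Str.slice s (some p.1) (some (p.1 + p.2))).toList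
      = (s.toList.drop p.1.toNat).take ((p.1 + p.2).toNat - p.1.toNat) := by
    simp only [PySem.Str.toList_slice, PySem.Chars.slice_eq_listSlice]
    exact PySem.List.slice_toNat _ h0 (by omega)
  rw [hsl]
  exact ((s.toList.drop p.1.toNat).take_prefix _).isInfix.trans
    (s.toList.drop_suffix p.1.toNat).isInfix

-- Conversely, a keyword that occurs as a substring produces a hit at some scanned pair.
theorem hit_of_isIn (s kw : String) (idx : Int)
    (hmem : (kw, idx) ∈ pvKW.items)
    (hlen : ((kw.toList.length : Int)) ∈ pvKW_LENS)
    (hne : kw.toList ≠ [])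
    (h : PySem.Str.isIn kw s = true) :
    ∃ p ∈ pvPairs s, pvLook s p = some idx := by
  have h' : ∃ j, kw.toList <+: s.toList.drop j :=
    (PySem.Chars.exists_prefix_drop_iff_isIn kw.toList s.toList).mpr
      (by simpa [PySem.Str.isIn] using h)
  rcases h' with ⟨j, hj⟩
  have hjlt : j < s.toList.length := by
    by_contra hge
    rw [List.drop_eq_nil_of_le (by omega)] at hj
    exact hne (List.prefix_nil.mp hj)
  refine ⟨((j : Int), (kw.toList.length : Int)), ?_, ?_⟩
  · exact (mem_pvPairs s _).mpr ⟨⟨by positivity, by simpa using hjlt⟩, hlen⟩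
  · unfold pvLook
    have hslice : PySem.Str.slice s (some (j : Int)) (some ((j : Int) + (kw.toList.length : Int))) = kw := by
      apply String.toList_inj.mp
      simp only [PySem.Str.toList_slice, PySem.Chars.slice_eq_listSlice]
      rw [PySem.List.slice_natCast_add]
      exact (List.prefix_iff_eq_take.mp hj).symm
    rw [hslice]
    exact (PySem.Dict.get?_eq_some_iff_mem_items pvKW kw idx (by decide)).mpr hmem

-- The two governing facts about the scan result.
theorem pvBest_le (s kw : String) (idx : Int)
    (hmem : (kw, idx) ∈ pvKW.items)
    (hlen : ((kw.toList.length : Int)) ∈ pvKW_LENS)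
    (hne : kw.toList ≠ [])
    (h : PySem.Str.isIn kw s = true) : pvBest s ≤ idx := by
  rcases hit_of_isIn s kw idx hmem hlen hne h with ⟨p, hp, hl⟩
  rw [pvBest_eq_scan]
  exact scanFold_le_of_hit (pvLook s) (pvPairs s) 6 p idx hp hl

theorem pvBest_cases (s : String) :
    pvBest s = 6 ∨ ∃ kw : String, (kw, pvBest s) ∈ pvKW.items ∧ PySem.Str.isIn kw s = true := by
  rw [pvBest_eq_scan]
  rcases scanFold_cases (pvLook s) (pvPairs s) 6 with hb | ⟨p, hp, hl⟩
  · left; exact hb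
  · right
    rcases isIn_of_hit s p _ hp hl with ⟨kw, hkw, hin⟩
    exact ⟨kw, hkw, hin⟩

theorem pvKW_items : pvKW.items =
  [("youtube", 0), ("video", 0), ("channel", 0),
   ("course", 1), ("udemy", 1), ("coursera", 1), ("edx", 1),
   ("documentation", 2), ("docs", 2), ("official", 2),
   ("blog", 3), ("article", 3), ("medium", 3),
   ("github", 4), ("repository", 4), ("repo", 4),
   ("book", 5), ("ebook", 5)] := by decide

-- ===== VERDICT (by name: the statement is the Claim_ definition above) =====
theorem determine_resource_type_py_spec : Claim_equal_determine_resource_type_py := by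
  intro line _
  unfold Spec_determine_resource_type_py
  rw [alt_eq_pvBest]
  set s := PySem.Str.lower line with hs
  unfold determine_resource_type_py
  rw [← hs]
  have hcases := pvBest_cases s
  simp only [List.any_cons, List.any_nil, Bool.or_false, Bool.or_eq_true] at *
  split_ifs with h1 h2 h3 h4 h5 h6
  · -- group 0 matched
    have hle : pvBest s ≤ 0 := by
      rcases h1 with h|h|h <;>
        exact pvBest_le s _ 0 (by decide) (by decide) (by decide) h
    have hb : pvBest s = 0 := by
      rcases hcases with h6' | ⟨kw, hmem, hin⟩
      · omega
      · rw [pvKW_items] at hmem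
        simp only [List.mem_cons, Prod.mk.injEq, List.not_mem_nil, or_false] at hmem
        rcases hmem with ⟨rfl, hv⟩|⟨rfl, hv⟩|⟨rfl, hv⟩|⟨rfl, hv⟩|⟨rfl, hv⟩|⟨rfl, hv⟩|⟨rfl, hv⟩|⟨rfl, hv⟩|⟨rfl, hv⟩|⟨rfl, hv⟩|⟨rfl, hv⟩|⟨rfl, hv⟩|⟨rfl, hv⟩|⟨rfl, hv⟩|⟨rfl, hv⟩|⟨rfl, hv⟩|⟨rfl, hv⟩|⟨rfl, hv⟩ <;>
          omega
    rw [hb]; decide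
  · -- group 1 matched
    have hle : pvBest s ≤ 1 := by
      rcases h2 with h|h|h|h <;>
        exact pvBest_le s _ 1 (by decide) (by decide) (by decide) h
    have hb : pvBest s = 1 := by
      rcases hcases with h6' | ⟨kw, hmem, hin⟩
      · omega
      · rw [pvKW_items] at hmem
        simp only [List.mem_cons, Prod.mk.injEq, List.not_mem_nil, or_false] at hmem
        rcases hmem with ⟨rfl, hv⟩|⟨rfl, hv⟩|⟨rfl, hv⟩|⟨rfl, hv⟩|⟨rfl, hv⟩|⟨rfl, hv⟩|⟨rfl, hv⟩|⟨rfl, hv⟩|⟨rfl, hv⟩|⟨rfl, hv⟩|⟨rfl, hv⟩|⟨rfl, hv⟩|⟨rfl, hv⟩|⟨rfl, hv⟩|⟨rfl, hv⟩|⟨rfl, hv⟩|⟨rfl, hv⟩|⟨rfl, hv⟩ <;>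
          first | omega | simp_all
    rw [hb]; decide
  · -- group 2 matched
    have hle : pvBest s ≤ 2 := by
      rcases h3 with h|h|h <;>
        exact pvBest_le s _ 2 (by decide) (by decide) (by decide) h
    have hb : pvBest s = 2 := by
      rcases hcases with h6' | ⟨kw, hmem, hin⟩
      · omega
      · rw [pvKW_items] at hmem
        simp only [List.mem_cons, Prod.mk.injEq, List.not_mem_nil, or_false] at hmem
        rcases hmem with ⟨rfl, hv⟩|⟨rfl, hv⟩|⟨rfl, hv⟩|⟨rfl, hv⟩|⟨rfl, hv⟩|⟨rfl, hv⟩|⟨rfl, hv⟩|⟨rfl, hv⟩|⟨rfl, hv⟩|⟨rfl, hv⟩|⟨rfl, hv⟩|⟨rfl, hv⟩|⟨rfl, hv⟩|⟨rfl, hv⟩|⟨rfl, hv⟩|⟨rfl, hv⟩|⟨rfl, hv⟩|⟨rfl, hv⟩ <;>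
          first | omega | simp_all
    rw [hb]; decide
  · -- group 3 matched
    have hle : pvBest s ≤ 3 := by
      rcases h4 with h|h|h <;>
        exact pvBest_le s _ 3 (by decide) (by decide) (by decide) h
    have hb : pvBest s = 3 := by
      rcases hcases with h6' | ⟨kw, hmem, hin⟩
      · omega
      · rw [pvKW_items] at hmem
        simp only [List.mem_cons, Prod.mk.injEq, List.not_mem_nil, or_false] at hmem
        rcases hmem with ⟨rfl, hv⟩|⟨rfl, hv⟩|⟨rfl, hv⟩|⟨rfl, hv⟩|⟨rfl, hv⟩|⟨rfl, hv⟩|⟨rfl, hv⟩|⟨rfl, hv⟩|⟨rfl, hv⟩|⟨rfl, hv⟩|⟨rfl, hv⟩|⟨rfl, hv⟩|⟨rfl, hv⟩|⟨rfl, hv⟩|⟨rfl, hv⟩|⟨rfl, hv⟩|⟨rfl, hv⟩|⟨rfl, hv⟩ <;>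
          first | omega | simp_all
    rw [hb]; decide
  · -- group 4 matched
    have hle : pvBest s ≤ 4 := by
      rcases h5 with h|h|h <;>
        exact pvBest_le s _ 4 (by decide) (by decide) (by decide) h
    have hb : pvBest s = 4 := by
      rcases hcases with h6' | ⟨kw, hmem, hin⟩
      · omega
      · rw [pvKW_items] at hmem
        simp only [List.mem_cons, Prod.mk.injEq, List.not_mem_nil, or_false] at hmem
        rcases hmem with ⟨rfl, hv⟩|⟨rfl, hv⟩|⟨rfl, hv⟩|⟨rfl, hv⟩|⟨rfl, hv⟩|⟨rfl, hv⟩|⟨rfl, hv⟩|⟨rfl, hv⟩|⟨rfl, hv⟩|⟨rfl, hv⟩|⟨rfl, hv⟩|⟨rfl, hv⟩|⟨rfl, hv⟩|⟨rfl, hv⟩|⟨rfl, hv⟩|⟨rfl, hv⟩|⟨rfl, hv⟩|⟨rfl, hv⟩ <;>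
          first | omega | simp_all
    rw [hb]; decide
  · -- group 5 matched
    have hle : pvBest s ≤ 5 := by
      rcases h6 with h|h <;>
        exact pvBest_le s _ 5 (by decide) (by decide) (by decide) h
    have hb : pvBest s = 5 := by
      rcases hcases with h6' | ⟨kw, hmem, hin⟩
      · omega
      · rw [pvKW_items] at hmem
        simp only [List.mem_cons, Prod.mk.injEq, List.not_mem_nil, or_false] at hmem
        rcases hmem with ⟨rfl, hv⟩|⟨rfl, hv⟩|⟨rfl, hv⟩|⟨rfl, hv⟩|⟨rfl, hv⟩|⟨rfl, hv⟩|⟨rfl, hv⟩|⟨rfl, hv⟩|⟨rfl, hv⟩|⟨rfl, hv⟩|⟨rfl, hv⟩|⟨rfl, hv⟩|⟨rfl, hv⟩|⟨rfl, hv⟩|⟨rfl, hv⟩|⟨rfl, hv⟩|⟨rfl, hv⟩|⟨rfl, hv⟩ <;>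
          first | omega | simp_all
    rw [hb]; decide
  · -- no group matched
    have hb : pvBest s = 6 := by
      rcases hcases with h6' | ⟨kw, hmem, hin⟩
      · exact h6'
      · rw [pvKW_items] at hmem
        simp only [List.mem_cons, Prod.mk.injEq, List.not_mem_nil, or_false] at hmem
        rcases hmem with ⟨rfl, hv⟩|⟨rfl, hv⟩|⟨rfl, hv⟩|⟨rfl, hv⟩|⟨rfl, hv⟩|⟨rfl, hv⟩|⟨rfl, hv⟩|⟨rfl, hv⟩|⟨rfl, hv⟩|⟨rfl, hv⟩|⟨rfl, hv⟩|⟨rfl, hv⟩|⟨rfl, hv⟩|⟨rfl, hv⟩|⟨rfl, hv⟩|⟨rfl, hv⟩|⟨rfl, hv⟩|⟨rfl, hv⟩ <;> simp_all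
    rw [hb]; decide
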